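-- pv_equiv track=rewrite | github.com/JKennethG283/cryptocurrency-time-series-modelling | experiment.py | _classify_features
-- ===== SOURCE A (Python) =====
-- from typing import Any, Callable, Iterable, Optional
--
-- def _classify_features(columns: Iterable[str], strict_ohlcv: bool) -> dict[str, list[str]]:
--     cols = list(columns)
--     macro = [c for c in cols if c.startswith("macro_")]
--     chain = [c for c in cols if c.startswith("btc_bc_") or c.startswith("eth_bc_")]
--     calendar = [c for c in cols if c in ("day_of_week", "hour")]
--     rest = [c for c in cols if c not in macro + chain + calendar]
--     if strict_ohlcv:
--         ohlcv = [c for c in rest if c not in calendar]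
--     else:
--         ohlcv = rest + calendar
--     return {"ohlcv": ohlcv, "macro": macro, "chain": chain}
-- ===== SOURCE B (Python) =====
-- def _classify_features(columns, strict_ohlcv):
--     macro, chain, calendar, rest = [], [], [], []
--     for c in columns:
--         if c.startswith("macro_"):
--             macro.append(c)
--         elif c.startswith("btc_bc_") or c.startswith("eth_bc_"):
--             chain.append(c)
--         elif c in ("day_of_week", "hour"):
--             calendar.append(c)
--         else:
--             rest.append(c)
--     ohlcv = rest if strict_ohlcv else rest + calendar
--     return {"ohlcv": ohlcv, "macro": macro, "chain": chain}
-- ===== Notes on version B (the rewrite author's own statement) =====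
-- stated objective: simpler
-- what changed: Replaces A's five list comprehensions (the rest pass scans macro+chain+calendar for every column and the strict branch re-filters rest against calendar) by a single pass that dispatches each column once into four accumulator lists.
import Mathlib
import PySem

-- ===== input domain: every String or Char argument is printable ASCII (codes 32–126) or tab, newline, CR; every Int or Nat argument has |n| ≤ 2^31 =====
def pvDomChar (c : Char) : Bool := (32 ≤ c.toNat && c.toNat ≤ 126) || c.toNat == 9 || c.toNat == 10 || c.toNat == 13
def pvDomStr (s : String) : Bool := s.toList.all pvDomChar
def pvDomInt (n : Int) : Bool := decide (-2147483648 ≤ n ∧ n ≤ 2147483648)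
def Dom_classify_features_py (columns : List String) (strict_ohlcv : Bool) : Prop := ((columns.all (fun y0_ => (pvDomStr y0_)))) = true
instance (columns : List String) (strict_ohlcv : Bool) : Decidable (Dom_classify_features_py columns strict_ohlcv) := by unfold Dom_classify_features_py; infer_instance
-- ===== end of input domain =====

-- B replaces A's five comprehensions (whose "rest" pass rescans macro+chain+calendar
-- per column) with one linear pass dispatching each column into four accumulators.


-- ===== PORT A =====
def classify_features_py (columns : List String) (strict_ohlcv : Bool) : List (String × List String) :=
  let cols := columns
  let macroL := cols.filter (fun c => PySem.Str.startswith c "macro_")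
  let chainL := cols.filter (fun c => PySem.Str.startswith c "btc_bc_" || PySem.Str.startswith c "eth_bc_")
  let calendarL := cols.filter (fun c => c == "day_of_week" || c == "hour")
  let restL := cols.filter (fun c => !((macroL ++ chainL ++ calendarL).contains c))
  let ohlcv := if strict_ohlcv then restL.filter (fun c => !(calendarL.contains c)) else restL ++ calendarL
  [("ohlcv", ohlcv), ("macro", macroL), ("chain", chainL)]

-- ===== PORT B =====
def classifyStep (st : List String × List String × List String × List String) (c : String) :
    List String × List String × List String × List String :=
  let (m, ch, cal, r) := st
  if PySem.Str.startswith c "macro_" then (m ++ [c], ch, cal, r)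
  else if PySem.Str.startswith c "btc_bc_" || PySem.Str.startswith c "eth_bc_" then (m, ch ++ [c], cal, r)
  else if c == "day_of_week" || c == "hour" then (m, ch, cal ++ [c], r)
  else (m, ch, cal, r ++ [c])

def classify_features_py_alt (columns : List String) (strict_ohlcv : Bool) : List (String × List String) :=
  let st := columns.foldl classifyStep ([], [], [], [])
  let ohlcv := if strict_ohlcv then st.2.2.2 else st.2.2.2 ++ st.2.2.1
  [("ohlcv", ohlcv), ("macro", st.1), ("chain", st.2.1)]

-- ===== PRECONDITION & SPEC =====
def Spec_classify_features_py (columns : List String) (strict_ohlcv : Bool) (out : List (String × List String)) : Prop := out = classify_features_py_alt columns strict_ohlcv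
instance (columns : List String) (strict_ohlcv : Bool) (out : List (String × List String)) : Decidable (Spec_classify_features_py columns strict_ohlcv out) := by unfold Spec_classify_features_py; infer_instance

-- ===== CLAIM (what is proved, stated in full; the proofs are below) =====
def Claim_equal_classify_features_py : Prop := ∀ (columns : List String) (strict_ohlcv : Bool), Dom_classify_features_py columns strict_ohlcv → Spec_classify_features_py columns strict_ohlcv (classify_features_py columns strict_ohlcv)

-- ===== LEMMAS AND PROOFS =====

-- the raw (A-side) tests
def pM (c : String) : Bool := PySem.Str.startswith c "macro_"
def pCh (c : String) : Bool := PySem.Str.startswith c "btc_bc_" || PySem.Str.startswith c "eth_bc_"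
def pCal (c : String) : Bool := c == "day_of_week" || c == "hour"

-- a string in the chain group does not start with "macro_"
theorem chain_not_macro (c : String) (h : pCh c = true) : pM c = false := by
  simp only [pM, pCh, PySem.Str.startswith_eq, Bool.or_eq_true] at *
  rw [PySem.Chars.startswith_iff, PySem.Chars.startswith_iff] at h
  simp only [Bool.eq_false_iff, ne_eq]
  rw [PySem.Chars.startswith_iff]
  intro hm
  obtain ⟨t, ht⟩ := hm
  rcases h with h | h <;> · obtain ⟨u, hu⟩ := h; rw [← ht] at hu; simp at hu

-- a calendar name is in neither the macro nor the chain group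
theorem cal_not_macro_chain (c : String) (h : pCal c = true) : pM c = false ∧ pCh c = false := by
  simp only [pCal, Bool.or_eq_true, beq_iff_eq] at h
  rcases h with h | h <;> subst h <;> exact ⟨by decide, by decide⟩

-- exclusivity, dispatched
theorem macro_chain_false (c : String) (h : pM c = true) : pCh c = false := by
  cases hc : pCh c
  · rfl
  · rw [chain_not_macro c hc] at h; exact absurd h (by simp)

theorem macro_cal_false (c : String) (h : pM c = true) : pCal c = false := by
  cases hc : pCal c
  · rfl
  · rw [(cal_not_macro_chain c hc).1] at h; exact absurd h (by simp)

theorem chain_cal_false (c : String) (h : pCh c = true) : pCal c = false := by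
  cases hc : pCal c
  · rfl
  · rw [(cal_not_macro_chain c hc).2] at h; exact absurd h (by simp)

-- the single pass accumulates exactly the four (mutually-exclusive) filters
theorem foldl_classifyStep (cols : List String) (m ch cal r : List String) :
    cols.foldl classifyStep (m, ch, cal, r) =
      (m ++ cols.filter pM, ch ++ cols.filter pCh, cal ++ cols.filter pCal,
       r ++ cols.filter (fun c => !(pM c || pCh c || pCal c))) := by
  induction cols generalizing m ch cal r with
  | nil => simp
  | cons c cs ih =>
    simp only [List.foldl_cons, classifyStep]
    split_ifs with hA hB hC
    · have hA' : pM c = true := hA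
      have hB' : pCh c = false := macro_chain_false c hA'
      have hC' : pCal c = false := macro_cal_false c hA'
      rw [ih]
      simp [hA', hB', hC']
    · have hB' : pCh c = true := hB
      have hA' : pM c = false := by cases h : pM c with | false => rfl | true => exact absurd h hA
      have hC' : pCal c = false := chain_cal_false c hB'
      rw [ih]
      simp [hA', hB', hC']
    · have hC' : pCal c = true := hC
      have hA' : pM c = false := by cases h : pM c with | false => rfl | true => exact absurd h hA
      have hB' : pCh c = false := by cases h : pCh c with | false => rfl | true => exact absurd h hB
      rw [ih]
      simp [hA', hB', hC']
    · have hA' : pM c = false := by cases h : pM c with | false => rfl | true => exact absurd h hA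
      have hB' : pCh c = false := by cases h : pCh c with | false => rfl | true => exact absurd h hB
      have hC' : pCal c = false := by cases h : pCal c with | false => rfl | true => exact absurd h hC
      rw [ih]
      simp [hA', hB', hC']

-- A's "rest" comprehension is the complement filter
theorem restL_eq (cols : List String) :
    cols.filter (fun c => !(((cols.filter pM) ++ (cols.filter pCh) ++ (cols.filter pCal)).contains c)) =
      cols.filter (fun c => !(pM c || pCh c || pCal c)) := by
  apply List.filter_congr
  intro c hc
  have hmem : (((cols.filter pM) ++ (cols.filter pCh) ++ (cols.filter pCal)).contains c) = (pM c || pCh c || pCal c) := by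
    rw [Bool.eq_iff_iff]
    simp [List.mem_filter, hc, Bool.or_assoc]
  rw [hmem]

-- in the strict branch, rest already avoids calendar, so the re-filter is the identity
theorem strict_filter_eq (cols : List String) :
    (cols.filter (fun c => !(pM c || pCh c || pCal c))).filter
        (fun c => !((cols.filter pCal).contains c)) =
      cols.filter (fun c => !(pM c || pCh c || pCal c)) := by
  rw [List.filter_eq_self]
  intro c hc
  rw [List.mem_filter] at hc
  have h3 : pCal c = false := by
    cases h : pCal c
    · rfl
    · exfalso; have := hc.2; simp [h] at this
  simp [List.mem_filter, h3]

-- ===== VERDICT (by name: the statement is the Claim_ definition above) =====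
theorem classify_features_py_spec : Claim_equal_classify_features_py := by
  intro columns strict_ohlcv _
  show classify_features_py columns strict_ohlcv = classify_features_py_alt columns strict_ohlcv
  unfold classify_features_py classify_features_py_alt
  have e1 : (fun c => PySem.Str.startswith c "macro_") = pM := rfl
  have e2 : (fun c => PySem.Str.startswith c "btc_bc_" || PySem.Str.startswith c "eth_bc_") = pCh := rfl
  have e3 : (fun c => c == "day_of_week" || c == "hour") = pCal := rfl
  simp only [e1, e2, e3]
  rw [foldl_classifyStep, restL_eq]
  cases strict_ohlcv
  · simp
  · simp only [List.nil_append, if_true]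
    rw [strict_filter_eq]
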